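-- pv_equiv track=rewrite | github.com/iWitLab/DPAR | PESrank/UI/mainUI.py | hidder
-- ===== SOURCE A (Python) =====
-- def hidder(password, newword):
--     first_set = set(password)
--     second_set = set(newword)
--     difference = first_set.symmetric_difference(second_set)
--     hidden = []
--     for char in newword:
--         if char in difference:
--             hidden.append(char)
--         else:
--             hidden.append('*')
--     hidden_pass = ''.join(hidden)
--     return hidden_pass
-- ===== SOURCE B (Python) =====
-- def hidder(password, newword):
--     # Staged passes: a char of newword is outside the symmetric difference iff
--     # it occurs in password, so masking = replacing every password char by '*'.
--     # One whole-string replace pass per password character (duplicates harmless).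
--     for c in password:
--         newword = newword.replace(c, '*')
--     return newword
-- ===== Notes on version B (the rewrite author's own statement) =====
-- stated objective: simpler
-- what changed: Instead of building two sets, a symmetric difference and scanning newword with a membership test, B loops over password and masks each of its characters with one whole-string str.replace pass.
import Mathlib
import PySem

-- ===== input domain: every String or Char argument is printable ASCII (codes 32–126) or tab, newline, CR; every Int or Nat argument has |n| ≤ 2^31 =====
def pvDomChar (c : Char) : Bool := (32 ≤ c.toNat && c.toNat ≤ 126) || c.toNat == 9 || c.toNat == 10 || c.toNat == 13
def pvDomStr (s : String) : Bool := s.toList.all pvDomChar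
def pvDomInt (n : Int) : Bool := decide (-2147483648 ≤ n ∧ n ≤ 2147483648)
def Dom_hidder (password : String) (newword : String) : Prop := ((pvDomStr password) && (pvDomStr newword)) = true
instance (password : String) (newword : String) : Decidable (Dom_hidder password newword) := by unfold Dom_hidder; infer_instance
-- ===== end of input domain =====

-- B replaces A's two set constructions, symmetric_difference and membership scan
-- by staged passes: one whole-string str.replace per password character (simpler).


-- ===== PORT A =====
def hidder (password : String) (newword : String) : String :=
  let first_set : PySem.Set Char := PySem.Set.ofList password.toList
  let second_set : PySem.Set Char := PySem.Set.ofList newword.toList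
  let difference : PySem.Set Char := PySem.Set.symmDiff first_set second_set
  let hidden : List Char :=
    newword.toList.foldl
      (fun acc char =>
        if PySem.Set.contains difference char then acc ++ [char] else acc ++ ['*']) []
  String.ofList hidden

-- ===== PORT B =====
-- for c in password: newword = newword.replace(c, '*')
def hidder_alt (password : String) (newword : String) : String :=
  password.toList.foldl
    (fun w c => PySem.Str.replace w (String.ofList [c]) "*") newword

-- ===== PRECONDITION & SPEC =====
def Spec_hidder (password : String) (newword : String) (out : String) : Prop := out = hidder_alt password newword
instance (password : String) (newword : String) (out : String) : Decidable (Spec_hidder password newword out) := by unfold Spec_hidder; infer_instance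

-- ===== CLAIM (what is proved, stated in full; the proofs are below) =====
def Claim_equal_hidder : Prop := ∀ (password : String) (newword : String), Dom_hidder password newword → Spec_hidder password newword (hidder password newword)

-- ===== LEMMAS AND PROOFS =====

-- replace.go with a single-char pattern masks exactly that char
theorem replace_go_singleton (c : Char) (fuel : Nat) (l acc : List Char)
    (h : l.length ≤ fuel) :
    PySem.Chars.replace.go [c] ['*'] fuel l acc
      = acc.reverse ++ l.map (fun x => if x = c then '*' else x) := by
  induction fuel generalizing l acc with
  | zero =>
    have : l = [] := List.length_eq_zero_iff.mp (Nat.le_zero.mp h)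
    subst this
    simp [PySem.Chars.replace.go]
  | succ fuel ih =>
    cases l with
    | nil => simp [PySem.Chars.replace.go]
    | cons c' t =>
      by_cases hc : c' = c
      · subst hc
        have hpre : List.isPrefixOf [c'] (c' :: t) = true := by
          simp [List.isPrefixOf]
        rw [PySem.Chars.replace.go]
        simp only [hpre, if_true, List.length_cons, List.drop_succ_cons, List.length_nil, List.drop_zero]
        rw [ih t _ (Nat.le_of_succ_le_succ h)]
        simp
      · have hpre : List.isPrefixOf [c] (c' :: t) = false := by
          simp only [List.isPrefixOf, Bool.and_eq_false_iff, beq_eq_false_iff_ne, ne_eq]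
          exact Or.inl fun h => hc h.symm
        rw [PySem.Chars.replace.go]
        simp only [hpre, Bool.false_eq_true, if_false]
        rw [ih t _ (Nat.le_of_succ_le_succ h)]
        simp [hc]

-- str.replace with a one-char pattern = pointwise mask
theorem replace_singleton (c : Char) (l : List Char) :
    PySem.Chars.replace l [c] ['*'] = l.map (fun x => if x = c then '*' else x) := by
  unfold PySem.Chars.replace
  simp only [List.isEmpty_cons, Bool.false_eq_true, if_false]
  simpa using replace_go_singleton c l.length l [] le_rfl

-- the staged replace passes mask exactly the chars of the processed prefix
theorem foldl_replace (pw : List Char) (w : List Char) :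
    (pw.foldl (fun (s : String) c => PySem.Str.replace s (String.ofList [c]) "*")
        (String.ofList w)).toList
      = w.map (fun x => if x ∈ pw then '*' else x) := by
  induction pw generalizing w with
  | nil => simp
  | cons c pw ih =>
    simp only [List.foldl_cons]
    have : PySem.Str.replace (String.ofList w) (String.ofList [c]) "*"
        = String.ofList (w.map (fun x => if x = c then '*' else x)) := by
      unfold PySem.Str.replace
      simp [replace_singleton]
    rw [this, ih]
    rw [List.map_map]
    apply List.map_congr_left
    intro x _
    by_cases hx : x = c
    · subst hx; simp
    · simp [hx, Function.comp]

-- the loop body of A appends one char per iteration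
theorem foldl_mask (p : Char → Bool) (l acc : List Char) :
    l.foldl (fun acc c => if p c then acc ++ [c] else acc ++ ['*']) acc
      = acc ++ l.map (fun c => if p c then c else '*') := by
  induction l generalizing acc with
  | nil => simp
  | cons c l ih => by_cases h : p c <;> simp [h, ih]

-- A computes the pointwise mask by chars of password
theorem hidder_eq_mask (password newword : String) :
    hidder password newword
      = String.ofList (newword.toList.map
          (fun c => if c ∈ password.toList then '*' else c)) := by
  unfold hidder
  simp only [foldl_mask, List.nil_append]
  congr 1
  apply List.map_congr_left
  intro c hc
  by_cases hp : c ∈ password.toList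
  · have hmem : PySem.Set.contains
        (PySem.Set.symmDiff (PySem.Set.ofList password.toList)
          (PySem.Set.ofList newword.toList)) c = false := by
      rw [Bool.eq_false_iff, Ne, PySem.Set.contains_iff, PySem.Set.mem_symmDiff]
      simp [PySem.Set.mem_ofList, hp, hc]
    rw [if_neg (by rw [hmem]; exact Bool.false_ne_true), if_pos hp]
  · have hmem : PySem.Set.contains
        (PySem.Set.symmDiff (PySem.Set.ofList password.toList)
          (PySem.Set.ofList newword.toList)) c = true := by
      rw [PySem.Set.contains_iff, PySem.Set.mem_symmDiff]
      simp [PySem.Set.mem_ofList, hp, hc]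
    rw [if_pos hmem, if_neg hp]

theorem hidder_spec_aux (password newword : String) :
    hidder password newword = hidder_alt password newword := by
  have hb : (hidder_alt password newword).toList
      = newword.toList.map (fun c => if c ∈ password.toList then '*' else c) := by
    unfold hidder_alt
    have := foldl_replace password.toList newword.toList
    simpa using this
  have : hidder_alt password newword = String.ofList ((hidder_alt password newword).toList) := by
    simp
  rw [this, hb, hidder_eq_mask]

-- ===== VERDICT (by name: the statement is the Claim_ definition above) =====
theorem hidder_spec : Claim_equal_hidder := by
  intro password newword _
  exact hidder_spec_aux password newword
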